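-- pv_equiv track=rewrite | github.com/ahmad-commits/aicp_internship | challenge_1/parking_problem.py | check_frequent_parking
-- ===== SOURCE A (Python) =====
-- def check_frequent_parking(parking_number) -> bool:
--     integer_digits = len(parking_number)
--     if integer_digits == 5:
--         check_digit = int(parking_number[-1])
--         weighted_sum = 0
--         i = integer_digits
--         x = 0
--         while i > 1:
--             weighted_sum += i * int(parking_number[x])
--             i -= 1
--             x += 1
--         return (check_digit == (11 - (weighted_sum % 11))) or (
--             check_digit == 0 and (weighted_sum % 11 == 0)
--         )
--     else:
--         return False
-- ===== SOURCE B (Python) =====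
-- def check_frequent_parking(parking_number) -> bool:
--     if len(parking_number) != 5:
--         return False
--     total = sum((5 - i) * int(parking_number[i]) for i in range(5))
--     return total % 11 == 0
-- ===== Notes on version B (the rewrite author's own statement) =====
-- stated objective: simpler
-- what changed: B folds all five digits (check digit included, weight 1) into one weighted sum and tests a single congruence total % 11 == 0, instead of A's separate check-digit extraction and two-clause comparison against 11 - (weighted_sum % 11).
import Mathlib
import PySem

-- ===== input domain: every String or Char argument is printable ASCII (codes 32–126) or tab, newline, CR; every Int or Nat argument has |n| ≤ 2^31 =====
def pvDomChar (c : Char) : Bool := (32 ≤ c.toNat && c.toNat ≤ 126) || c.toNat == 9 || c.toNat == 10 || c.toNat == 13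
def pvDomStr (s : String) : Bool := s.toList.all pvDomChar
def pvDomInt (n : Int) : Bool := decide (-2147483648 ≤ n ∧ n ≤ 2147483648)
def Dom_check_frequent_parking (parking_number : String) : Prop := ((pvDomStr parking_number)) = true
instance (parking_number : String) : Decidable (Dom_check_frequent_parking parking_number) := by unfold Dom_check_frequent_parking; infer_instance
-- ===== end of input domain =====

-- B replaces A's separate check-digit extraction and two-clause comparison by one weighted
-- sum over all five digits (weights 5..1) and a single congruence 'total % 11 == 0' (objective: simpler).

-- ===== PORT A =====
-- the while-loop of A: while i > 1: weighted_sum += i * int(s[x]); i -= 1; x += 1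
-- (fuel bounds the iterations; 5 is enough since i starts at 5; none = ValueError/IndexError)
def pvLoopA (s : String) (fuel : Nat) (i x acc : Int) : Option Int :=
  match fuel with
  | 0 => some acc
  | f + 1 =>
    if 1 < i then
      match PySem.Str.pyGet? s x with
      | none => none
      | some ch =>
        match PySem.Int.ofChars? [ch] with
        | none => none
        | some d => pvLoopA s f (i - 1) (x + 1) (acc + i * d)
    else some acc

def check_frequent_parking (parking_number : String) : Bool :=
  let integer_digits : Int := PySem.Str.len parking_number
  if integer_digits = 5 then
    match PySem.Str.pyGet? parking_number (-1) with
    | none => false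
    | some ch =>
      match PySem.Int.ofChars? [ch] with
      | none => false
      | some check_digit =>
        match pvLoopA parking_number 5 integer_digits 0 0 with
        | none => false
        | some weighted_sum =>
          (check_digit == 11 - PySem.Int.mod weighted_sum 11) ||
            (check_digit == 0 && PySem.Int.mod weighted_sum 11 == 0)
  else false

-- ===== PORT B =====
def check_frequent_parking_alt (parking_number : String) : Bool :=
  if PySem.Str.len parking_number ≠ 5 then false
  else
    match (PySem.List.pyRange 0 5 1).foldl (fun acc i =>
      match acc with
      | none => none
      | some t =>
        match PySem.Str.pyGet? parking_number i with
        | none => none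
        | some ch =>
          match PySem.Int.ofChars? [ch] with
          | none => none
          | some d => some (t + (5 - i) * d)) (some 0) with
    | none => false
    | some total => PySem.Int.mod total 11 == 0

-- ===== PRECONDITION & SPEC =====
-- Pre_ excludes only length-5 strings containing a non-digit character: there int(...) raises
-- ValueError in both A and B.
def Pre_check_frequent_parking (parking_number : String) : Prop :=
  parking_number.toList.length = 5 →
    parking_number.toList.all (fun c => '0' ≤ c && c ≤ '9') = true
instance (parking_number : String) : Decidable (Pre_check_frequent_parking parking_number) := by
  unfold Pre_check_frequent_parking; infer_instance

def pvWitness_check_frequent_parking : String := "02420"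

def Spec_check_frequent_parking (parking_number : String) (out : Bool) : Prop := out = check_frequent_parking_alt parking_number
instance (parking_number : String) (out : Bool) : Decidable (Spec_check_frequent_parking parking_number out) := by unfold Spec_check_frequent_parking; infer_instance

-- ===== CLAIM (what is proved, stated in full; the proofs are below) =====
def Claim_equal_check_frequent_parking : Prop := ∀ (parking_number : String), Dom_check_frequent_parking parking_number → Pre_check_frequent_parking parking_number → Spec_check_frequent_parking parking_number (check_frequent_parking parking_number)

-- ===== LEMMAS AND PROOFS =====

-- a character between '0' and '9' is one of the ten digit characters
lemma pv_digit_mem (c : Char) (h0 : '0' ≤ c) (h9 : c ≤ '9') :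
    c ∈ ['0','1','2','3','4','5','6','7','8','9'] := by
  have h1 : 48 ≤ c.toNat := by simpa [Char.le_def, UInt32.le_iff_toNat_le] using h0
  have h2 : c.toNat ≤ 57 := by simpa [Char.le_def, UInt32.le_iff_toNat_le] using h9
  have hc : c = Char.ofNat c.toNat := (Char.ofNat_toNat c).symm
  interval_cases h : c.toNat <;> rw [hc] <;> decide

-- int of one digit character returns some value in [0, 9]
lemma pv_digit_val (c : Char) (h : c ∈ ['0','1','2','3','4','5','6','7','8','9']) :
    ∃ d : Int, PySem.Int.ofChars? [c] = some d ∧ 0 ≤ d ∧ d ≤ 9 := by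
  fin_cases h
  · exact ⟨0, by decide, by decide, by decide⟩
  · exact ⟨1, by decide, by decide, by decide⟩
  · exact ⟨2, by decide, by decide, by decide⟩
  · exact ⟨3, by decide, by decide, by decide⟩
  · exact ⟨4, by decide, by decide, by decide⟩
  · exact ⟨5, by decide, by decide, by decide⟩
  · exact ⟨6, by decide, by decide, by decide⟩
  · exact ⟨7, by decide, by decide, by decide⟩
  · exact ⟨8, by decide, by decide, by decide⟩
  · exact ⟨9, by decide, by decide, by decide⟩

-- ===== VERDICT (by name: the statement is the Claim_ definition above) =====
theorem check_frequent_parking_spec : Claim_equal_check_frequent_parking := by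
  intro s _ hpre
  unfold Spec_check_frequent_parking
  unfold check_frequent_parking check_frequent_parking_alt
  by_cases hlen : s.toList.length = 5
  · -- the string has exactly five characters
    obtain ⟨c1, c2, c3, c4, c5, hs⟩ :
        ∃ c1 c2 c3 c4 c5, s.toList = [c1, c2, c3, c4, c5] := by
      match hl : s.toList, hlen with
      | [a, b, c, d, e], _ => exact ⟨a, b, c, d, e, rfl⟩
    have hdig := hpre hlen
    rw [hs] at hdig
    simp only [List.all_cons, List.all_nil, Bool.and_true, Bool.and_eq_true,
      decide_eq_true_eq] at hdig
    obtain ⟨⟨g1, g1'⟩, ⟨g2, g2'⟩, ⟨g3, g3'⟩, ⟨g4, g4'⟩, g5, g5'⟩ := hdig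
    obtain ⟨d1, he1, hd1l, hd1u⟩ := pv_digit_val c1 (pv_digit_mem c1 g1 g1')
    obtain ⟨d2, he2, hd2l, hd2u⟩ := pv_digit_val c2 (pv_digit_mem c2 g2 g2')
    obtain ⟨d3, he3, hd3l, hd3u⟩ := pv_digit_val c3 (pv_digit_mem c3 g3 g3')
    obtain ⟨d4, he4, hd4l, hd4u⟩ := pv_digit_val c4 (pv_digit_mem c4 g4 g4')
    obtain ⟨d5, he5, hd5l, hd5u⟩ := pv_digit_val c5 (pv_digit_mem c5 g5 g5')
    have hL : PySem.Str.len s = 5 := by rw [PySem.Str.len_eq, hlen]; rfl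
    have hsl : s.length = 5 := by rw [← String.length_toList, hlen]
    rw [hL]
    simp only [PySem.Str.pyGet?, PySem.Chars.pyGet?_eq_listPyGet?, hs]
    norm_num [pvLoopA, PySem.List.pyRange, PySem.List.pyGet?, PySem.List.pyIdx?, hs, hsl,
      List.range_succ, show Int.toNat 2 = 2 from rfl, show Int.toNat 3 = 3 from rfl, show Int.toNat 4 = 4 from rfl, show Int.toNat 5 = 5 from rfl, List.map_append, List.map_cons, List.map_nil,
      List.foldl_append, List.foldl_cons, List.foldl_nil, he1, he2, he3, he4, he5]
    rw [Bool.eq_iff_iff]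
    simp only [Bool.or_eq_true, Bool.and_eq_true, beq_iff_eq]
    omega
  · have hsl : ((s.length : Int)) ≠ 5 := by
      rw [String.length_toList] at hlen; exact_mod_cast fun h => hlen (by exact_mod_cast h)
    simp [PySem.Str.len_eq, hsl]
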